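-- pv_equiv track=rewrite | github.com/SebastianEudave/CelularAtutomata | ProyectoF.py | PalabraBinario
-- ===== SOURCE A (Python) =====
-- def PalabraBinario(cadena):
--     simbolos = 'abcdefghijklmnñopqrstuvwxyz1234 '
--     simbolos2 = [[0,0,0,0,0],[0,0,0,0,1],[0,0,0,1,0],[0,0,0,1,1],[0,0,1,0,0],[0,0,1,0,1],[0,0,1,1,0],[0,0,1,1,1],[0,1,0,0,0],[0,1,0,0,1],[0,1,0,1,0],[0,1,0,1,1],[0,1,1,0,0],[0,1,1,0,1],[0,1,1,1,0],[0,1,1,1,1],[1,0,0,0,0],[1,0,0,0,1],[1,0,0,1,0],[1,0,0,1,1],[1,0,1,0,0],[1,0,1,0,1],[1,0,1,1,0],[1,0,1,1,1],[1,1,0,0,0],[1,1,0,0,1],[1,1,0,1,0],[1,1,0,1,1],[1,1,1,0,0],[1,1,1,0,1],[1,1,1,1,0],[1,1,1,1,1]]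
--     nuevaC = []
--     for letra in cadena:
--         pos = simbolos.find(letra.lower())
--         for i in range(5):
--             nuevaC.append(simbolos2[pos][i])
--     return nuevaC
-- ===== SOURCE B (Python) =====
-- def PalabraBinario(cadena):
--     simbolos = 'abcdefghijklmnñopqrstuvwxyz1234 '
--     nuevaC = []
--     for letra in cadena:
--         m = simbolos.find(letra.lower()) % 32
--         bits = []
--         for _ in range(5):
--             m, b = divmod(m, 2)
--             bits.append(b)
--         nuevaC.extend(reversed(bits))
--     return nuevaC
-- ===== Notes on version B (the rewrite author's own statement) =====
-- stated objective: simpler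
-- what changed: The hard-coded 32-row bit table is removed: each character's 5-bit code is computed arithmetically (pos % 32 followed by five divmod-by-2 steps, bits emitted back-to-front), which also reproduces A's all-ones output for absent characters since -1 % 32 == 31.
import Mathlib
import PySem

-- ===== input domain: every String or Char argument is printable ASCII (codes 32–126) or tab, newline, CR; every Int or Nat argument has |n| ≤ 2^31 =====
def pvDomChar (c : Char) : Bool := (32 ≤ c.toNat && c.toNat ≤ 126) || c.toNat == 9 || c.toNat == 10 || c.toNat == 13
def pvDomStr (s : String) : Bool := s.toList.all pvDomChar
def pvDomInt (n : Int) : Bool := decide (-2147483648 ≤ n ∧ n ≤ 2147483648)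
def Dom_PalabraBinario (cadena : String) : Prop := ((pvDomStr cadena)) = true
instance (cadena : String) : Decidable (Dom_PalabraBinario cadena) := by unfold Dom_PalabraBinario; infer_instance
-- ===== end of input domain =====

-- B replaces A's 32-row lookup table by computing the 5 bits of pos % 32 arithmetically
-- (divmod loop built back-to-front); objective: simpler. A = B on all inputs.

-- ===== PORT A =====
def pvSimbolos : String := "abcdefghijklmnñopqrstuvwxyz1234 "

def pvSimbolos2 : List (List Int) := [[0,0,0,0,0],[0,0,0,0,1],[0,0,0,1,0],[0,0,0,1,1],[0,0,1,0,0],[0,0,1,0,1],[0,0,1,1,0],[0,0,1,1,1],[0,1,0,0,0],[0,1,0,0,1],[0,1,0,1,0],[0,1,0,1,1],[0,1,1,0,0],[0,1,1,0,1],[0,1,1,1,0],[0,1,1,1,1],[1,0,0,0,0],[1,0,0,0,1],[1,0,0,1,0],[1,0,0,1,1],[1,0,1,0,0],[1,0,1,0,1],[1,0,1,1,0],[1,0,1,1,1],[1,1,0,0,0],[1,1,0,0,1],[1,1,0,1,0],[1,1,0,1,1],[1,1,1,0,0],[1,1,1,0,1],[1,1,1,1,0],[1,1,1,1,1]]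

def PalabraBinario (cadena : String) : List Int :=
  cadena.toList.foldl (fun nuevaC letra =>
    let pos : Int := PySem.Str.find pvSimbolos (String.ofList (PySem.Chars.lower [letra]))
    -- indices are always in range (pos ∈ [-1,31]), so the defaults of pyGetD are never used
    (PySem.List.pyRange 0 5 1).foldl (fun acc i =>
      acc ++ [PySem.List.pyGetD (PySem.List.pyGetD pvSimbolos2 pos []) i 0]) nuevaC) []

-- ===== PORT B =====
-- five iterations of `m, b = divmod(m, 2); bits.append(b)`
def pvBitsLoop : Int → Nat → List Int → (Int × List Int)
  | m, 0, bits => (m, bits)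
  | m, n+1, bits => pvBitsLoop (PySem.Int.floordiv m 2) n (bits ++ [PySem.Int.mod m 2])

def PalabraBinario_alt (cadena : String) : List Int :=
  cadena.toList.foldl (fun nuevaC letra =>
    let m : Int := PySem.Int.mod (PySem.Str.find pvSimbolos (String.ofList (PySem.Chars.lower [letra]))) 32
    nuevaC ++ ((pvBitsLoop m 5 []).2).reverse) []

-- ===== PRECONDITION & SPEC =====
def Spec_PalabraBinario (cadena : String) (out : List Int) : Prop := out = PalabraBinario_alt cadena
instance (cadena : String) (out : List Int) : Decidable (Spec_PalabraBinario cadena out) := by unfold Spec_PalabraBinario; infer_instance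

-- ===== CLAIM (what is proved, stated in full; the proofs are below) =====
def Claim_equal_PalabraBinario : Prop := ∀ (cadena : String), Dom_PalabraBinario cadena → Spec_PalabraBinario cadena (PalabraBinario cadena)

-- ===== LEMMAS AND PROOFS =====

-- the find result is at least -1 and at most 31 (the string has 32 chars and the sub is one char)
lemma pvFind_bounds (c : Char) :
    -1 ≤ PySem.Chars.find pvSimbolos.toList (PySem.Chars.lower [c]) ∧
    PySem.Chars.find pvSimbolos.toList (PySem.Chars.lower [c]) ≤ 31 := by
  have hlo := PySem.Chars.neg_one_le_find pvSimbolos.toList (PySem.Chars.lower [c])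
  have hhi := PySem.Chars.find_le_length pvSimbolos.toList (PySem.Chars.lower [c])
  have hlen : (pvSimbolos.toList.length : Int) = 32 := by decide
  refine ⟨hlo, ?_⟩
  rw [hlen] at hhi
  rcases eq_or_lt_of_le hhi with h32 | h32
  · exfalso
    have h0 : 0 ≤ PySem.Chars.find pvSimbolos.toList (PySem.Chars.lower [c]) := by omega
    have hs := (PySem.Chars.find_spec h0).1
    rw [h32] at hs
    have hnil : pvSimbolos.toList.drop (Int.toNat 32) = [] := by decide
    rw [hnil] at hs
    have := List.prefix_nil.mp hs
    simp [PySem.Chars.lower] at this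
  · omega

-- for every pos in [-1,31], A's table row equals B's computed bits
lemma pvChunk_eq (p : Int) (h1 : -1 ≤ p) (h2 : p ≤ 31) :
    (PySem.List.pyRange 0 5 1).map
      (fun i => PySem.List.pyGetD (PySem.List.pyGetD pvSimbolos2 p []) i 0)
    = ((pvBitsLoop (PySem.Int.mod p 32) 5 []).2).reverse := by
  interval_cases p <;> decide

lemma pvStep_eq (acc : List Int) (letra : Char) :
    (PySem.List.pyRange 0 5 1).foldl (fun a i =>
      a ++ [PySem.List.pyGetD (PySem.List.pyGetD pvSimbolos2
        (PySem.Str.find pvSimbolos (String.ofList (PySem.Chars.lower [letra]))) []) i 0]) acc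
    = acc ++ ((pvBitsLoop (PySem.Int.mod
        (PySem.Str.find pvSimbolos (String.ofList (PySem.Chars.lower [letra]))) 32) 5 []).2).reverse := by
  rw [PySem.List.foldl_append_singleton_eq_map]
  congr 1
  have hb := pvFind_bounds letra
  have hfe : PySem.Str.find pvSimbolos (String.ofList (PySem.Chars.lower [letra]))
      = PySem.Chars.find pvSimbolos.toList (PySem.Chars.lower [letra]) := by
    simp [PySem.Str.find_eq, String.toList_ofList]
  rw [hfe]
  exact pvChunk_eq _ hb.1 hb.2

lemma pvLoop_eq (l : List Char) (acc : List Int) :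
    l.foldl (fun nuevaC letra =>
      let pos : Int := PySem.Str.find pvSimbolos (String.ofList (PySem.Chars.lower [letra]))
      (PySem.List.pyRange 0 5 1).foldl (fun a i =>
        a ++ [PySem.List.pyGetD (PySem.List.pyGetD pvSimbolos2 pos []) i 0]) nuevaC) acc
    = l.foldl (fun nuevaC letra =>
      let m : Int := PySem.Int.mod (PySem.Str.find pvSimbolos (String.ofList (PySem.Chars.lower [letra]))) 32
      nuevaC ++ ((pvBitsLoop m 5 []).2).reverse) acc := by
  induction l generalizing acc with
  | nil => rfl
  | cons c t ih =>
    simp only [List.foldl_cons]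
    rw [pvStep_eq]
    exact ih _

-- ===== VERDICT (by name: the statement is the Claim_ definition above) =====
theorem PalabraBinario_spec : Claim_equal_PalabraBinario := by
  intro cadena _
  unfold Spec_PalabraBinario PalabraBinario PalabraBinario_alt
  exact pvLoop_eq _ _
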